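-- pv_equiv track=rewrite | github.com/i960107/algorithm | programmers/트리_이진트리의최대깊이.py | solution
-- ===== SOURCE A (Python) =====
-- from typing import List, Optional
--
-- def solution(tree: List[int]) -> int:
--     '''인덱스로 탐색'''
--     if not tree:
--         return 0
--     index = 1
--     depth = 1
--     while index * 2 - 1 < len(tree):
--         index *= 2
--         depth += 1
--     return depth
-- ===== SOURCE B (Python) =====
-- from typing import List, Optional
--
-- def solution(tree: List[int]) -> int:
--     '''closed form: depth of a complete binary tree with n nodes is n.bit_length()'''
--     return len(tree).bit_length()
-- ===== Notes on version B (the rewrite author's own statement) =====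
-- stated objective: simpler
-- what changed: Replaced the index-doubling while loop with the closed form len(tree).bit_length(), which equals floor(log2 n)+1 for n>0 and 0 for the empty tree.
import Mathlib
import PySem

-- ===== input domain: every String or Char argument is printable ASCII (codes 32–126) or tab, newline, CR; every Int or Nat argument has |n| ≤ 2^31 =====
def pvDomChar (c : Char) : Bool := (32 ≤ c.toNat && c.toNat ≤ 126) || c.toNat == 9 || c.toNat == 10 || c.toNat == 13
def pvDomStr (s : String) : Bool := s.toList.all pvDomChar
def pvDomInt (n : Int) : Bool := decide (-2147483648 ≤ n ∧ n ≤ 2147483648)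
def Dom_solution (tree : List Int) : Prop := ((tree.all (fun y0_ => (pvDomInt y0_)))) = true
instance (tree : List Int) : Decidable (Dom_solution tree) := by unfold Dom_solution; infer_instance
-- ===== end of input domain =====

-- B replaces A's index-doubling loop by the closed form n.bit_length(); objective: simpler.
-- ===== PORT A =====
-- while index*2-1 < len(tree): index *= 2; depth += 1   (the 0 < index guard only makes the loop total; index starts at 1)
def solLoopA (n index depth : Nat) : Nat :=
  if h : index * 2 - 1 < n ∧ 0 < index then solLoopA n (index * 2) (depth + 1) else depth
  termination_by n - index
  decreasing_by omega

def solution (tree : List Int) : Int :=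
  if tree = [] then 0 else (solLoopA tree.length 1 1 : Int)

-- ===== PORT B =====
-- len(tree).bit_length(): 0 for 0, floor(log2 n) + 1 otherwise
def pyBitLength (n : Nat) : Nat := if n = 0 then 0 else Nat.log2 n + 1

def solution_alt (tree : List Int) : Int := (pyBitLength tree.length : Int)

-- ===== PRECONDITION & SPEC =====
def Spec_solution (tree : List Int) (out : Int) : Prop := out = solution_alt tree
instance (tree : List Int) (out : Int) : Decidable (Spec_solution tree out) := by unfold Spec_solution; infer_instance

-- ===== CLAIM (what is proved, stated in full; the proofs are below) =====
def Claim_equal_solution : Prop := ∀ (tree : List Int), Dom_solution tree → Spec_solution tree (solution tree)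

-- ===== LEMMAS AND PROOFS =====
theorem solLoopA_eq (n index depth : Nat) (hi : 0 < index) :
    solLoopA n index depth = depth + Nat.log2 (n / index) := by
  fun_induction solLoopA n index depth with
  | case1 index depth h ih =>
      rw [ih (by omega)]
      have hge : 2 ≤ n / index := (Nat.le_div_iff_mul_le h.2).2 (by omega)
      have hdd : n / (index * 2) = n / index / 2 := by
        rw [Nat.div_div_eq_div_mul]
      have hpos : 0 < Nat.log 2 (n / index) := Nat.log_pos (by omega) hge
      rw [hdd, Nat.log2_eq_log_two, Nat.log2_eq_log_two, Nat.log_div_base]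
      omega
  | case2 index depth h =>
      have h2 : n / index < 2 := by
        by_contra hc
        have := (Nat.le_div_iff_mul_le hi).1 (by omega : 2 ≤ n / index)
        omega
      rw [Nat.log2_eq_log_two, Nat.log_of_lt h2]
      omega

-- ===== VERDICT (by name: the statement is the Claim_ definition above) =====
theorem solution_spec : Claim_equal_solution := by
  intro tree _
  unfold Spec_solution solution solution_alt pyBitLength
  by_cases h : tree = []
  · simp [h]
  · have hn : tree.length ≠ 0 := by simpa using h
    rw [if_neg h, if_neg hn, solLoopA_eq _ _ _ (by omega)]
    simp [Nat.div_one, Nat.add_comm]
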